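-- pv_equiv track=rewrite | github.com/mibrah02/ontario-regs-text | app/rag.py | _normalize_migratory_lines
-- ===== SOURCE A (Python) =====
-- def _normalize_migratory_lines(page_text: str) -> list[str]:
--     raw_lines = [line.strip() for line in page_text.splitlines() if line.strip()]
--     lines: list[str] = []
--     index = 0
--     while index < len(raw_lines):
--         line = raw_lines[index]
--         next_line = raw_lines[index + 1] if index + 1 < len(raw_lines) else ""
--         if line in {"Hudson-James", "Hudson-James Bay", "Northern", "Central", "Southern"} and next_line in {"Bay District", "District"}:
--             lines.append(f"{line} {next_line}")
--             index += 2
--             continue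
--         if line == "Hudson-James Bay" and next_line == "District":
--             lines.append("Hudson-James Bay District")
--             index += 2
--             continue
--         lines.append(line)
--         index += 1
--     return lines
-- ===== SOURCE B (Python) =====
-- _PREFIXES = {"Hudson-James", "Hudson-James Bay", "Northern", "Central", "Southern"}
-- _SUFFIXES = {"Bay District", "District"}
--
--
-- def _normalize_migratory_lines(page_text: str) -> list[str]:
--     out: list[str] = []
--     pending = None  # a region-name prefix waiting for its suffix line
--     for line in page_text.splitlines():
--         line = line.strip()
--         if not line:
--             continue
--         if pending is not None:
--             if line in _SUFFIXES:
--                 out.append(f"{pending} {line}")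
--                 pending = None
--                 continue
--             out.append(pending)
--             pending = None
--         if line in _PREFIXES:
--             pending = line
--         else:
--             out.append(line)
--     if pending is not None:
--         out.append(pending)
--     return out
-- ===== Notes on version B (the rewrite author's own statement) =====
-- stated objective: alternative
-- what changed: Replaced the index/lookahead while-loop (peeking at raw_lines[index+1] and jumping the index by 2 on a merge) with a single forward pass over the lines that carries the prefix awaiting its suffix as loop state, flushing it when the next line is/isn't a suffix and at the end.
import Mathlib
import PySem

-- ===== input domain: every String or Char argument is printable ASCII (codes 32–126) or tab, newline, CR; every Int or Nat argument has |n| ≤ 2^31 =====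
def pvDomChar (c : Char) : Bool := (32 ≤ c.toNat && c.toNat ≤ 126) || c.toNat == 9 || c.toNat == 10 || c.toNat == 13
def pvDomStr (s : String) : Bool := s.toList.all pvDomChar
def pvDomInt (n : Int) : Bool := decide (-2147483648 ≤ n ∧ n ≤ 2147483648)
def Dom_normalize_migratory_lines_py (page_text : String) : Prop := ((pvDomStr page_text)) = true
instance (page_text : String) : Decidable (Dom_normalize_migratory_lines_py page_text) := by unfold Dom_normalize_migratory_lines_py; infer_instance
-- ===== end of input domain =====

-- B replaces A's index/lookahead loop with a state machine carrying the prefix awaiting its suffix line; same result (objective: alternative decomposition).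

-- ===== PORT A =====
def pvPrefixA (s : String) : Bool :=
  s == "Hudson-James" || s == "Hudson-James Bay" || s == "Northern" || s == "Central" || s == "Southern"

def pvSuffixA (s : String) : Bool :=
  s == "Bay District" || s == "District"

-- the while-loop of A: recursion over the remaining raw lines, peeking at the next line ("" if none)
def pvAGo : List String → List String
  | [] => []
  | [line] =>
    -- next_line = "" (no line after); neither merge condition can hold, the ifs are kept for fidelity
    if pvPrefixA line && pvSuffixA "" then [line ++ " " ++ ""]
    else if line == "Hudson-James Bay" && "" == "District" then ["Hudson-James Bay District"]
    else [line]
  | line :: next_line :: rest =>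
    if pvPrefixA line && pvSuffixA next_line then
      (line ++ " " ++ next_line) :: pvAGo rest
    else if line == "Hudson-James Bay" && next_line == "District" then
      "Hudson-James Bay District" :: pvAGo rest
    else
      line :: pvAGo (next_line :: rest)

def normalize_migratory_lines_py (page_text : String) : List String :=
  let raw_lines := ((PySem.Str.splitlines page_text).map PySem.Str.strip).filter (fun l => l ≠ "")
  pvAGo raw_lines

-- ===== PORT B =====
def pvPrefixB (s : String) : Bool :=
  s == "Hudson-James" || s == "Hudson-James Bay" || s == "Northern" || s == "Central" || s == "Southern"

def pvSuffixB (s : String) : Bool :=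
  s == "Bay District" || s == "District"

-- body of one iteration of B's for-loop on a non-empty stripped line: state = (out so far, pending prefix)
def pvBCore (st : List String × Option String) (line : String) : List String × Option String :=
  match st with
  | (out, some p) =>
    if pvSuffixB line then (out ++ [p ++ " " ++ line], none)
    else if pvPrefixB line then (out ++ [p], some line)
    else (out ++ [p, line], none)
  | (out, none) =>
    if pvPrefixB line then (out, some line)
    else (out ++ [line], none)

-- one iteration of B's for-loop: strip, skip empty, then the body
def pvBStep (st : List String × Option String) (line0 : String) : List String × Option String :=
  let line := PySem.Str.strip line0
  if line = "" then st else pvBCore st line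

def normalize_migratory_lines_py_alt (page_text : String) : List String :=
  let st := (PySem.Str.splitlines page_text).foldl pvBStep ([], none)
  match st with
  | (out, some p) => out ++ [p]
  | (out, none) => out

-- ===== PRECONDITION & SPEC =====
def Spec_normalize_migratory_lines_py (page_text : String) (out : List String) : Prop := out = normalize_migratory_lines_py_alt page_text
instance (page_text : String) (out : List String) : Decidable (Spec_normalize_migratory_lines_py page_text out) := by unfold Spec_normalize_migratory_lines_py; infer_instance

-- ===== CLAIM (what is proved, stated in full; the proofs are below) =====
def Claim_equal_normalize_migratory_lines_py : Prop := ∀ (page_text : String), Dom_normalize_migratory_lines_py page_text → Spec_normalize_migratory_lines_py page_text (normalize_migratory_lines_py page_text)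

-- ===== LEMMAS AND PROOFS =====

def pvFlush (st : List String × Option String) : List String :=
  match st with
  | (out, some p) => out ++ [p]
  | (out, none) => out

lemma pvAGo_not_prefix (l : String) (rest : List String) (h : pvPrefixA l = false) :
    pvAGo (l :: rest) = l :: pvAGo rest := by
  cases rest with
  | nil => simp [pvAGo, h, pvSuffixA]
  | cons n r =>
    have hb : (l == "Hudson-James Bay") = false := by
      by_contra hc
      simp at hc
      simp [pvPrefixA, hc] at h
    simp [pvAGo, h, hb]

lemma pvPrefixB_eq : pvPrefixB = pvPrefixA := rfl

lemma pvSuffixB_eq : pvSuffixB = pvSuffixA := rfl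

lemma pvB_inv (ms : List String) : ∀ (acc : List String) (pending : Option String),
    (∀ p, pending = some p → pvPrefixA p = true) →
    pvFlush (ms.foldl pvBCore (acc, pending)) =
      acc ++ pvAGo (match pending with | some p => p :: ms | none => ms) := by
  induction ms with
  | nil =>
    intro acc pending hp
    cases pending with
    | none => simp [pvFlush, pvAGo]
    | some p => simp [pvFlush, pvAGo, hp p rfl, pvSuffixA]
  | cons m ms ih =>
    intro acc pending hp
    cases pending with
    | none =>
      by_cases hm : pvPrefixB m = true
      · simp only [List.foldl_cons, pvBCore, hm, if_pos]
        exact ih acc (some m) (by intro p hpe; cases hpe; rwa [← pvPrefixB_eq])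
      · have hm' : pvPrefixB m = false := by simpa using hm
        simp only [List.foldl_cons, pvBCore, hm', Bool.false_eq_true, ite_false]
        rw [ih (acc ++ [m]) none (by intro p hpe; cases hpe),
            pvAGo_not_prefix m ms (pvPrefixB_eq ▸ hm')]
        simp
    | some p =>
      have hpA : pvPrefixA p = true := hp p rfl
      by_cases hs : pvSuffixB m = true
      · simp only [List.foldl_cons, pvBCore, hs, if_pos]
        rw [ih (acc ++ [p ++ " " ++ m]) none (by intro q hq; cases hq)]
        have : pvAGo (p :: m :: ms) = (p ++ " " ++ m) :: pvAGo ms := by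
          simp [pvAGo, hpA, pvSuffixB_eq ▸ hs]
        rw [this]; simp
      · have hs' : pvSuffixB m = false := by simpa using hs
        have hmD : (m == "District") = false := by
          by_contra hc; simp at hc; simp [pvSuffixB, hc] at hs'
        have hsplit : pvAGo (p :: m :: ms) = p :: pvAGo (m :: ms) := by
          simp [pvAGo, pvSuffixB_eq ▸ hs', hmD]
        by_cases hm : pvPrefixB m = true
        · simp only [List.foldl_cons, pvBCore, hs', hm, Bool.false_eq_true, if_pos, ite_false]
          rw [ih (acc ++ [p]) (some m) (by intro q hq; cases hq; rwa [← pvPrefixB_eq]), hsplit]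
          simp
        · have hm' : pvPrefixB m = false := by simpa using hm
          simp only [List.foldl_cons, pvBCore, hs', hm', Bool.false_eq_true, ite_false]
          rw [ih (acc ++ [p, m]) none (by intro q hq; cases hq), hsplit,
              pvAGo_not_prefix m ms (pvPrefixB_eq ▸ hm')]
          simp

lemma pvFoldl_strip (ls : List String) (st : List String × Option String) :
    ls.foldl pvBStep st =
      (ls.map PySem.Str.strip |>.filter (fun l => l ≠ "")).foldl pvBCore st := by
  induction ls generalizing st with
  | nil => rfl
  | cons l rest ih =>
    by_cases h : PySem.Str.strip l = ""
    · simp [pvBStep, h, ih]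
    · simp [pvBStep, h, ih]

-- ===== VERDICT (by name: the statement is the Claim_ definition above) =====
theorem normalize_migratory_lines_py_spec : Claim_equal_normalize_migratory_lines_py := by
  intro page_text _
  unfold Spec_normalize_migratory_lines_py normalize_migratory_lines_py normalize_migratory_lines_py_alt
  rw [pvFoldl_strip]
  have h := pvB_inv ((PySem.Str.splitlines page_text).map PySem.Str.strip |>.filter (fun l => l ≠ ""))
      [] none (by intro p h; cases h)
  simp only [pvFlush] at h
  simpa using h.symm
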